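-- pv_equiv track=rewrite | github.com/musicmrman99/limar | modules/command_utils/command_transformer.py | subject_in
-- ===== SOURCE A (Python) =====
-- from typing import Any, cast
--
-- def subject_in(
--         command_items: dict[str, Any],
--         subject: list[str]
-- ) -> list[str]:
--     all_subjects = set() # Values ignored
--     for command_item in command_items.values():
--         if 'subjects' in command_item:
--             all_subjects.update(command_item['subjects'])
--
--     return [
--         single_subject
--         for single_subject in subject
--         if single_subject in all_subjects
--     ]
-- ===== SOURCE B (Python) =====
-- def subject_in(command_items, subject):
--     # Different decomposition: no pre-built index set.  Each candidate is
--     # tested by a helper that scans the command items on demand, and the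
--     # result is assembled with an explicit accumulator loop.
--     items = list(command_items.values())
--     out = []
--     for single in subject:
--         if _occurs(single, items):
--             out.append(single)
--     return out
--
-- def _occurs(name, items):
--     for ci in items:
--         if 'subjects' in ci and name in ci['subjects']:
--             return True
--     return False
-- ===== Notes on version B (the rewrite author's own statement) =====
-- stated objective: alternative
-- what changed: Drops A's two-phase design (first fold all command items into a set of subjects, then filter): B keeps no index at all and instead, in an explicit accumulator loop over the candidates, tests each one with a helper that scans the command items on demand and short-circuits at the first hit.
import Mathlib
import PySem

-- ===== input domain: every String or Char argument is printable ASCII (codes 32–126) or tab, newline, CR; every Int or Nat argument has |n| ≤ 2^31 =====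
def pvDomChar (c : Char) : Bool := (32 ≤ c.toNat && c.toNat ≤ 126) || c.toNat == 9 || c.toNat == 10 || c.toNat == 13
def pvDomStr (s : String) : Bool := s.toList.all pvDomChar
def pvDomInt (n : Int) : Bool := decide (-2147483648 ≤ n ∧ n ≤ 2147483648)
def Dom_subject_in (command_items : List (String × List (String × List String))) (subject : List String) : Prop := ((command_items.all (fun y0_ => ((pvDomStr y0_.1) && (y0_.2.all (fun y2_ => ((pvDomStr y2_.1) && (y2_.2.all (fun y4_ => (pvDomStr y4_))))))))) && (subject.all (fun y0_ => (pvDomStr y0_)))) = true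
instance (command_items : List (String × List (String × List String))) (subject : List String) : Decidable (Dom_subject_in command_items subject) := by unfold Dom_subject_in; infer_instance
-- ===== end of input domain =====

-- B drops A's pre-built subject index set: an explicit accumulator loop tests each
-- candidate via a short-circuiting scan of the command items (alternative decomposition).


-- ===== PORT A =====
-- A: fold all command items into a set of subjects, then filter the candidate
-- list by membership in that set.
def subject_in (command_items : List (String × List (String × List String))) (subject : List String) : List String :=
  let all_subjects : PySem.Set String :=
    command_items.foldl (fun s kv =>
      match (kv.2.find? (fun p => p.1 == "subjects")).map (·.2) with
      | some subs => PySem.Set.update s subs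
      | none => s) PySem.Set.empty
  subject.filter (fun single_subject => PySem.Set.contains all_subjects single_subject)

-- ===== PORT B =====
-- first value under key "subjects", written as explicit recursion
def bLookup : List (String × List String) → Option (List String)
  | [] => none
  | (k, v) :: rest => if k == "subjects" then some v else bLookup rest

-- `'subjects' in ci and name in ci['subjects']` over the items, short-circuiting
def bOccurs (name : String) : List (String × List (String × List String)) → Bool
  | [] => false
  | kv :: rest =>
    match bLookup kv.2 with
    | some subs => if subs.contains name then true else bOccurs name rest
    | none => bOccurs name rest

-- accumulator loop over the candidates (output appended, as Source B's `out.append`)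
def bGo (items : List (String × List (String × List String))) : List String → List String → List String
  | [], acc => acc.reverse
  | s :: rest, acc => bGo items rest (if bOccurs s items then s :: acc else acc)

def subject_in_alt (command_items : List (String × List (String × List String))) (subject : List String) : List String :=
  bGo command_items subject []

-- ===== PRECONDITION & SPEC =====
def Spec_subject_in (command_items : List (String × List (String × List String))) (subject : List String) (out : List String) : Prop := out = subject_in_alt command_items subject
instance (command_items : List (String × List (String × List String))) (subject : List String) (out : List String) : Decidable (Spec_subject_in command_items subject out) := by unfold Spec_subject_in; infer_instance

-- ===== CLAIM =====
def Claim_equal_subject_in : Prop := ∀ (command_items : List (String × List (String × List String))) (subject : List String), Dom_subject_in command_items subject → Spec_subject_in command_items subject (subject_in command_items subject)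

-- ===== LEMMAS AND PROOFS =====

theorem bLookup_eq (l : List (String × List String)) :
    bLookup l = (l.find? (fun p => p.1 == "subjects")).map (·.2) := by
  induction l with
  | nil => rfl
  | cons hd tl ih =>
    obtain ⟨k, v⟩ := hd
    by_cases h : k == "subjects" <;> simp [bLookup, List.find?, h, ih]

theorem bOccurs_eq (name : String) (cis : List (String × List (String × List String))) :
    bOccurs name cis
      = cis.any (fun kv => decide (name ∈ (bLookup kv.2).getD [])) := by
  induction cis with
  | nil => rfl
  | cons hd tl ih =>
    rw [List.any_cons, bOccurs]
    cases h : bLookup hd.2 with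
    | none => simp [ih]
    | some subs =>
      by_cases hm : subs.contains name
      · simp_all [List.contains_eq_mem]
      · simp_all [List.contains_eq_mem]

theorem bGo_eq (items : List (String × List (String × List String)))
    (subject acc : List String) :
    bGo items subject acc
      = acc.reverse ++ subject.filter (fun s => bOccurs s items) := by
  induction subject generalizing acc with
  | nil => simp [bGo]
  | cons s rest ih =>
    rw [bGo, ih]
    by_cases h : bOccurs s items <;> simp [h]

theorem decide_mem_update (s : PySem.Set String) (l : List String) (x : String) :
    decide (x ∈ PySem.Set.update s l) = (decide (x ∈ s) || decide (x ∈ l)) := by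
  simp [PySem.Set.mem_update]

theorem step_eq (s : PySem.Set String) (o : Option (List String)) :
    (match o with
     | some subs => PySem.Set.update s subs
     | none => s) = PySem.Set.update s (o.getD []) := by
  cases o <;> simp [PySem.Set.update]

theorem contains_foldl_eq (cis : List (String × List (String × List String)))
    (s : PySem.Set String) (x : String) :
    decide (x ∈
      (cis.foldl (fun s kv =>
        PySem.Set.update s (((kv.2.find? (fun p => p.1 == "subjects")).map (·.2)).getD [])) s))
    = (decide (x ∈ s) ||
        cis.any (fun kv => decide (x ∈ ((kv.2.find? (fun p => p.1 == "subjects")).map (·.2)).getD []))) := by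
  induction cis generalizing s with
  | nil => simp
  | cons hd tl ih =>
    rw [List.foldl_cons, List.any_cons, ih, decide_mem_update, Bool.or_assoc]

-- ===== VERDICT =====
theorem subject_in_spec : Claim_equal_subject_in := by
  intro command_items subject _
  unfold Spec_subject_in subject_in subject_in_alt
  rw [bGo_eq]
  simp only [List.reverse_nil, List.nil_append]
  apply List.filter_congr
  intro x _
  rw [bOccurs_eq]
  simp [PySem.Set.contains, List.contains_eq_mem, step_eq, bLookup_eq,
    contains_foldl_eq, PySem.Set.empty]
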